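-- pv_equiv track=rewrite | github.com/edwinyyyu/MemMachine | evaluation/attribute_memory/research/round16a_sliding_window/architectures/aen1_sliding.py | _render_window
-- ===== SOURCE A (Python) =====
-- def _render_window(
--     window_turns: list[tuple[int, str]],
--     target_turn_lo: int,
-- ) -> str:
--     """Render the window with explicit CONTEXT / TARGET separation."""
--     lines = []
--     in_target = False
--     for tidx, text in window_turns:
--         if not in_target and tidx >= target_turn_lo:
--             lines.append("--- TARGET TURNS (emit entries for these) ---")
--             in_target = True
--         if not in_target:
--             lines.append(f"  CONTEXT TURN {tidx}: {text}")
--         else: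
--             lines.append(f"  TARGET  TURN {tidx}: {text}")
--     if not in_target:
--         # All target (window_size <= K)
--         lines.insert(0, "--- TARGET TURNS (emit entries for these) ---")
--     return "\n".join(lines)
-- ===== SOURCE B (Python) =====
-- def _render_window(
--     window_turns: list[tuple[int, str]],
--     target_turn_lo: int,
-- ) -> str:
--     """Render the window with explicit CONTEXT / TARGET separation."""
--     header = "--- TARGET TURNS (emit entries for these) ---"
--
--     def go(turns):
--         # Render `turns` recursively (no target seen yet); returns the rendered
--         # text together with whether a target turn exists in `turns`.
--         if not turns:
--             return "", False
--         tidx, text = turns[0]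
--         if tidx >= target_turn_lo:
--             body = "".join(f"\n  TARGET  TURN {u}: {y}" for u, y in turns)
--             return header + body, True
--         rest, found = go(turns[1:])
--         line = f"  CONTEXT TURN {tidx}: {text}"
--         return (line if rest == "" else line + "\n" + rest), found
--
--     rendered, found = go(window_turns)
--     if found:
--         return rendered
--     return header if rendered == "" else header + "\n" + rendered
-- ===== Notes on version B (the rewrite author's own statement) =====
-- stated objective: alternative
-- what changed: Replaces A's flag-driven loop that appends formatted lines to a list and joins them at the end by a recursive string builder: a helper recurses down the turn list building the rendered text directly (returning it paired with a target-found flag), switching to a one-shot tail rendering at the first target turn.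
import Mathlib
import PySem

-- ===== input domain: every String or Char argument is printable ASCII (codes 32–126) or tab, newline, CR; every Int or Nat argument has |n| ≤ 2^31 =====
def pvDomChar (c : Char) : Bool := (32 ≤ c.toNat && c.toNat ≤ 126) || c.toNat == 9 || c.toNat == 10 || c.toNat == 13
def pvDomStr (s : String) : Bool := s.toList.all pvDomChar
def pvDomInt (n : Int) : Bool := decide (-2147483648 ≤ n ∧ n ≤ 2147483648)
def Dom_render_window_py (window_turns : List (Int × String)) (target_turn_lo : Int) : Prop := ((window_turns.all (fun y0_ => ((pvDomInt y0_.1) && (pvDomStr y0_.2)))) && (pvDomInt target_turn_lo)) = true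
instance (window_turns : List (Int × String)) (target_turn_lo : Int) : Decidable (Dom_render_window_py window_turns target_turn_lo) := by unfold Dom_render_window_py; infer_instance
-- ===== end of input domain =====

-- B replaces A's flag-driven append loop over a list of lines by a recursive
-- string builder returning (rendered text, target-found) — a different decomposition, same cost.

-- Shared line-formatting helpers (the f-string literals of both Pythons)
def pvHeader : List Char := "--- TARGET TURNS (emit entries for these) ---".toList

def pvCtxLine (tidx : Int) (text : String) : List Char :=
  "  CONTEXT TURN ".toList ++ PySem.Int.toChars tidx ++ ": ".toList ++ text.toList

def pvTgtLine (tidx : Int) (text : String) : List Char :=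
  "  TARGET  TURN ".toList ++ PySem.Int.toChars tidx ++ ": ".toList ++ text.toList

-- ===== PORT A =====
-- literal transliteration of A's flag-driven loop: state = (lines, in_target)
def pvStepA (target_turn_lo : Int) (st : List (List Char) × Bool) (p : Int × String) :
    List (List Char) × Bool :=
  let st1 : List (List Char) × Bool :=
    if st.2 = false ∧ target_turn_lo ≤ p.1 then (st.1 ++ [pvHeader], true) else st
  if st1.2 = false then (st1.1 ++ [pvCtxLine p.1 p.2], st1.2)
  else (st1.1 ++ [pvTgtLine p.1 p.2], st1.2)

def render_window_py (window_turns : List (Int × String)) (target_turn_lo : Int) : String :=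
  let st := window_turns.foldl (pvStepA target_turn_lo) ([], false)
  let lines := if st.2 = false then pvHeader :: st.1 else st.1
  String.ofList (PySem.Chars.join ['\n'] lines)

-- ===== PORT B =====
-- Source B's recursive `go`: renders the suffix directly as a string, returning
-- (rendered text, whether a target turn exists in the suffix)
def pvGoB (target_turn_lo : Int) : List (Int × String) → List Char × Bool
  | [] => ([], false)
  | p :: rest =>
    if target_turn_lo ≤ p.1 then
      (pvHeader ++ ((p :: rest).map (fun q => '\n' :: pvTgtLine q.1 q.2)).flatten, true)
    else
      let r := pvGoB target_turn_lo rest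
      ((if r.1 = [] then pvCtxLine p.1 p.2 else pvCtxLine p.1 p.2 ++ '\n' :: r.1), r.2)

def render_window_py_alt (window_turns : List (Int × String)) (target_turn_lo : Int) : String :=
  let r := pvGoB target_turn_lo window_turns
  String.ofList
    (if r.2 then r.1 else if r.1 = [] then pvHeader else pvHeader ++ '\n' :: r.1)

-- ===== PRECONDITION & SPEC =====
def Spec_render_window_py (window_turns : List (Int × String)) (target_turn_lo : Int) (out : String) : Prop := out = render_window_py_alt window_turns target_turn_lo
instance (window_turns : List (Int × String)) (target_turn_lo : Int) (out : String) : Decidable (Spec_render_window_py window_turns target_turn_lo out) := by unfold Spec_render_window_py; infer_instance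

-- ===== CLAIM (what is proved, stated in full; the proofs are below) =====
def Claim_equal_render_window_py : Prop := ∀ (window_turns : List (Int × String)) (target_turn_lo : Int), Dom_render_window_py window_turns target_turn_lo → Spec_render_window_py window_turns target_turn_lo (render_window_py window_turns target_turn_lo)

-- ===== LEMMAS AND PROOFS =====
-- proof-side: the first index with tidx ≥ lo, used to characterise both programs
def pvSplit (window_turns : List (Int × String)) (target_turn_lo : Int) : Option Nat :=
  match window_turns with
  | [] => none
  | p :: rest =>
    if target_turn_lo ≤ p.1 then some 0
    else (pvSplit rest target_turn_lo).map (· + 1)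

-- once in_target is true, A appends only TARGET lines
theorem pvFoldA_true (lo : Int) (wt : List (Int × String)) (acc : List (List Char)) :
    wt.foldl (pvStepA lo) (acc, true)
      = (acc ++ wt.map (fun p => pvTgtLine p.1 p.2), true) := by
  induction wt generalizing acc with
  | nil => simp
  | cons p rest ih =>
    simp only [List.foldl_cons, List.map_cons]
    rw [show pvStepA lo (acc, true) p = (acc ++ [pvTgtLine p.1 p.2], true) by
      simp [pvStepA]]
    rw [ih]
    simp

-- A's fold from in_target = false, characterised by the split index
theorem pvFoldA_false (lo : Int) (wt : List (Int × String)) (acc : List (List Char)) :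
    wt.foldl (pvStepA lo) (acc, false)
      = match pvSplit wt lo with
        | none => (acc ++ wt.map (fun p => pvCtxLine p.1 p.2), false)
        | some i =>
          (acc ++ (wt.take i).map (fun p => pvCtxLine p.1 p.2)
             ++ [pvHeader] ++ (wt.drop i).map (fun p => pvTgtLine p.1 p.2), true) := by
  induction wt generalizing acc with
  | nil => simp [pvSplit]
  | cons p rest ih =>
    by_cases h : lo ≤ p.1
    · have hstep : pvStepA lo (acc, false) p = (acc ++ [pvHeader] ++ [pvTgtLine p.1 p.2], true) := by
        simp [pvStepA, h]
      simp only [List.foldl_cons, hstep, pvFoldA_true, pvSplit, if_pos h]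
      simp
    · have hstep : pvStepA lo (acc, false) p = (acc ++ [pvCtxLine p.1 p.2], false) := by
        simp [pvStepA, h]
      simp only [List.foldl_cons, hstep, ih, pvSplit, if_neg h]
      cases hs : pvSplit rest lo with
      | none => simp
      | some i => simp

-- '\n'.join written head-first: join ['\n'] (x :: l) = x ++ flatten of '\n'-prefixed tails
theorem pvJoinNL_cons (x : List Char) (l : List (List Char)) :
    PySem.Chars.join ['\n'] (x :: l) = x ++ (l.map (fun y => '\n' :: y)).flatten := by
  induction l generalizing x with
  | nil => simp [PySem.Chars.join_singleton]
  | cons y l ih =>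
    rw [PySem.Chars.join_cons_cons, ih y]
    simp

theorem pvJoinNL_cons_ne (x : List Char) (l : List (List Char)) (h : l ≠ []) :
    PySem.Chars.join ['\n'] (x :: l) = x ++ '\n' :: PySem.Chars.join ['\n'] l := by
  cases l with
  | nil => exact absurd rfl h
  | cons y l' => rw [PySem.Chars.join_cons_cons]; simp

theorem pvCtx_ne_nil (tidx : Int) (text : String) : pvCtxLine tidx text ≠ [] := by
  simp [pvCtxLine]

theorem pvJoinNL_ne_nil (x : List Char) (l : List (List Char)) (hx : x ≠ []) :
    PySem.Chars.join ['\n'] (x :: l) ≠ [] := by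
  rw [pvJoinNL_cons]
  exact fun h => hx (List.append_eq_nil_iff.mp h).1

-- B's recursion, characterised by the same split index
theorem pvGoB_char (lo : Int) (wt : List (Int × String)) :
    pvGoB lo wt
      = match pvSplit wt lo with
        | none => (PySem.Chars.join ['\n'] (wt.map (fun p => pvCtxLine p.1 p.2)), false)
        | some i =>
          (PySem.Chars.join ['\n'] ((wt.take i).map (fun p => pvCtxLine p.1 p.2)
             ++ [pvHeader] ++ (wt.drop i).map (fun p => pvTgtLine p.1 p.2)), true) := by
  induction wt with
  | nil => simp [pvGoB, pvSplit, PySem.Chars.join_nil]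
  | cons p rest ih =>
    by_cases h : lo ≤ p.1
    · simp only [pvGoB, if_pos h, pvSplit, List.take_zero, List.drop_zero, List.map_nil,
        List.nil_append, List.singleton_append]
      rw [pvJoinNL_cons]
      simp [Function.comp_def]
    · simp only [pvGoB, if_neg h, pvSplit, ih]
      cases hs : pvSplit rest lo with
      | none =>
        cases rest with
        | nil => simp [PySem.Chars.join_nil, PySem.Chars.join_singleton]
        | cons q rest' =>
          dsimp only
          have hne := pvJoinNL_ne_nil (pvCtxLine q.1 q.2)
            ((rest'.map (fun p => pvCtxLine p.1 p.2))) (pvCtx_ne_nil q.1 q.2)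
          simp only [List.map_cons, Option.map_none] at hne ⊢
          rw [if_neg hne, PySem.Chars.join_cons_cons]
          simp
      | some i =>
        dsimp only
        have hne : PySem.Chars.join ['\n'] ((rest.take i).map (fun p => pvCtxLine p.1 p.2)
            ++ [pvHeader] ++ (rest.drop i).map (fun p => pvTgtLine p.1 p.2)) ≠ [] := by
          cases hti : (rest.take i).map (fun p => pvCtxLine p.1 p.2) with
          | nil =>
            simp only [List.nil_append]
            exact pvJoinNL_ne_nil pvHeader _ (by simp [pvHeader])
          | cons c cs =>
            have := List.map_eq_cons_iff.mp hti
            obtain ⟨q, qs, -, hc, -⟩ := this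
            simp only [List.cons_append]
            exact pvJoinNL_ne_nil c _ (hc ▸ pvCtx_ne_nil q.1 q.2)
        rw [if_neg hne]
        simp only [Option.map_some, List.take_succ_cons, List.drop_succ_cons, List.map_cons,
          List.cons_append]
        rw [pvJoinNL_cons_ne _ _ (by simp)]

-- ===== VERDICT (by name: the statement is the Claim_ definition above) =====
theorem render_window_py_spec : Claim_equal_render_window_py := by
  intro wt lo _
  unfold Spec_render_window_py render_window_py render_window_py_alt
  rw [pvFoldA_false, pvGoB_char]
  cases hs : pvSplit wt lo with
  | some i => simp
  | none =>
    cases wt with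
    | nil => simp [PySem.Chars.join_nil, PySem.Chars.join_singleton]
    | cons p rest =>
      have hne := pvJoinNL_ne_nil (pvCtxLine p.1 p.2)
        (rest.map (fun q => pvCtxLine q.1 q.2)) (pvCtx_ne_nil p.1 p.2)
      simp only [List.map_cons] at hne ⊢
      simp only [if_true, List.nil_append, Bool.false_eq_true, if_false, if_neg hne]
      rw [PySem.Chars.join_cons_cons]
      simp
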